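-- pv_equiv track=rewrite | github.com/shinich39/rename-py | get.py | get_max_lengths
-- ===== SOURCE A (Python) =====
-- def get_max_lengths(l):
--   sizes = []
--   for i, a in enumerate(l):
--     for j, b in enumerate(a):
--       if len(sizes) <= j:
--         sizes.append(0)
--
--       if sizes[j] < len(b):
--         sizes[j] = len(b)
--   return sizes
-- ===== SOURCE B (Python) =====
-- def get_max_lengths(l):
--   if not l:
--     return []
--   cols = max(len(a) for a in l)
--   return [max(len(a[j]) for a in l if j < len(a)) for j in range(cols)]
-- ===== Notes on version B (the rewrite author's own statement) =====
-- stated objective: simpler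
-- what changed: Replaces the row-major incremental pass that grows and mutates a sizes list with a column-major formulation: compute the column count once, then one comprehension taking the max length per column over the rows that reach it.
import Mathlib
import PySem

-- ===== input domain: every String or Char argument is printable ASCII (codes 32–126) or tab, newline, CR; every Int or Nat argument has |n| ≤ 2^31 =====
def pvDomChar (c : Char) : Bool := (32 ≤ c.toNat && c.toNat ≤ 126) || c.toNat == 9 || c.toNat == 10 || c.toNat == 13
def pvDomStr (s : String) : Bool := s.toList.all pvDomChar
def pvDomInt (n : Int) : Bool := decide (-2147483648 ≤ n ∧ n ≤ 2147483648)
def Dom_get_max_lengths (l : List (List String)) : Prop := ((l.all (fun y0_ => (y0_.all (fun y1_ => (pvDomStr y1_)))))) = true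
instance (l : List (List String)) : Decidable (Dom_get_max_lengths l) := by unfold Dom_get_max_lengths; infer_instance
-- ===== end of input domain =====

-- B replaces A's row-major mutating single pass by a column-major comprehension (a different decomposition; same cost).

-- ===== PORT A =====
-- 'for j, b in enumerate(a)' ported as structural recursion carrying the index j;
-- sizes[j] is read with getD 0 (the Python index is always in range at that point).
def pvInnerA (sizes : List Int) (j : Nat) : List String → List Int
  | [] => sizes
  | b :: rest =>
      let sizes1 := if sizes.length ≤ j then sizes ++ [0] else sizes
      let sizes2 := if sizes1.getD j 0 < PySem.Str.len b then sizes1.set j (PySem.Str.len b) else sizes1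
      pvInnerA sizes2 (j + 1) rest
def get_max_lengths (l : List (List String)) : List Int :=
  l.foldl (fun sizes a => pvInnerA sizes 0 a) []

-- ===== PORT B =====
def get_max_lengths_alt (l : List (List String)) : List Int :=
  if l = [] then []
  else
    let cols : Int := (PySem.List.max? (l.map fun a => ((a.length : Int))) (fun x => x)).getD 0
    (PySem.List.pyRange 0 cols).map fun j =>
      (PySem.List.max? ((l.filter (fun a => decide (j < (a.length : Int)))).map
          (fun a => PySem.Str.len (a.getD j.toNat ""))) (fun x => x)).getD 0

-- ===== PRECONDITION & SPEC =====
def Spec_get_max_lengths (l : List (List String)) (out : List Int) : Prop := out = get_max_lengths_alt l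
instance (l : List (List String)) (out : List Int) : Decidable (Spec_get_max_lengths l out) := by unfold Spec_get_max_lengths; infer_instance

-- ===== CLAIM (what is proved, stated in full; the proofs are below) =====
def Claim_equal_get_max_lengths : Prop := ∀ (l : List (List String)), Dom_get_max_lengths l → Spec_get_max_lengths l (get_max_lengths l)

-- ===== LEMMAS AND PROOFS =====

def rowLens (a : List String) : List Int := a.map PySem.Str.len
def pvMerge : List Int → List Int → List Int
  | s, [] => s
  | [], x :: xs => max 0 x :: pvMerge [] xs
  | y :: ys, x :: xs => max y x :: pvMerge ys xs

theorem pvInnerA_eq (a : List String) (pre suf : List Int) :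
    pvInnerA (pre ++ suf) pre.length a = pre ++ pvMerge suf (rowLens a) := by
  induction a generalizing pre suf with
  | nil => cases suf <;> simp only [pvInnerA, pvMerge, rowLens, List.map_nil, List.append_nil]
  | cons b rest ih =>
    cases suf with
    | nil =>
      have hget : (pre ++ [(0:Int)]).getD pre.length 0 = 0 := by
        rw [List.getD_eq_getElem _ _ (by simp)]; simp
      have hset : ∀ v : Int, (pre ++ [(0:Int)]).set pre.length v = pre ++ [v] := by
        intro v; rw [List.set_append_right _ _ (le_refl _)]; simp
      have h1 : pvInnerA (pre ++ []) pre.length (b :: rest)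
          = pvInnerA ((pre ++ [max 0 (PySem.Str.len b)]) ++ []) (pre ++ [max 0 (PySem.Str.len b)]).length rest := by
        simp only [pvInnerA]
        rw [List.append_nil, if_pos (le_refl _), hget]
        by_cases h : (0:Int) < PySem.Str.len b
        · rw [if_pos h, hset, max_eq_right (le_of_lt h)]
          congr 1 <;> simp
        · rw [if_neg h, max_eq_left (le_of_not_gt h)]
          congr 1 <;> simp
      rw [h1, ih]
      simp [pvMerge, rowLens]
    | cons y ys =>
      have hlen : ¬ (pre ++ y :: ys).length ≤ pre.length := by simp
      have hget : (pre ++ y :: ys).getD pre.length 0 = y := by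
        rw [List.getD_eq_getElem _ _ (by simp)]; simp
      have hset : ∀ v : Int, (pre ++ y :: ys).set pre.length v = (pre ++ [v]) ++ ys := by
        intro v; rw [List.set_append_right _ _ (le_refl _)]; simp
      have h1 : pvInnerA (pre ++ y :: ys) pre.length (b :: rest)
          = pvInnerA ((pre ++ [max y (PySem.Str.len b)]) ++ ys) (pre ++ [max y (PySem.Str.len b)]).length rest := by
        simp only [pvInnerA]
        rw [if_neg hlen, hget]
        by_cases h : y < PySem.Str.len b
        · rw [if_pos h, hset, max_eq_right (le_of_lt h)]
          congr 1 <;> simp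
        · rw [if_neg h, max_eq_left (le_of_not_gt h)]
          congr 1 <;> simp
      rw [h1, ih]
      simp [pvMerge, rowLens]

theorem get_max_lengths_eq_foldl_merge (l : List (List String)) :
    get_max_lengths l = l.foldl (fun s a => pvMerge s (rowLens a)) [] := by
  unfold get_max_lengths
  apply PySem.List.foldl_congr_mem
  intro acc a _
  simpa using pvInnerA_eq a [] acc

theorem pvMerge_length (s r : List Int) : (pvMerge s r).length = max s.length r.length := by
  induction r generalizing s with
  | nil => simp [pvMerge]
  | cons x xs ih => cases s <;> simp [pvMerge, ih]

theorem pvMerge_getD (r s : List Int) (j : Nat) :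
    (pvMerge s r).getD j 0 = if j < r.length then max (s.getD j 0) (r.getD j 0) else s.getD j 0 := by
  induction r generalizing s j with
  | nil => simp [pvMerge]
  | cons x xs ih =>
    cases s with
    | nil =>
      cases j with
      | zero => simp [pvMerge]
      | succ n => simpa [pvMerge, List.getD, Nat.succ_lt_succ_iff] using ih [] n
    | cons y ys =>
      cases j with
      | zero => simp [pvMerge]
      | succ n => simpa [pvMerge, List.getD, Nat.succ_lt_succ_iff] using ih ys n

def pvColStep (j : Nat) (acc : Int) (a : List String) : Int :=
  if j < a.length then max acc ((rowLens a).getD j 0) else acc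

theorem foldl_merge_getD (l : List (List String)) (s : List Int) (j : Nat) :
    (l.foldl (fun s a => pvMerge s (rowLens a)) s).getD j 0 = l.foldl (pvColStep j) (s.getD j 0) := by
  induction l generalizing s with
  | nil => simp
  | cons a t ih =>
    simp only [List.foldl_cons]
    rw [ih, pvMerge_getD]
    have hr : (rowLens a).length = a.length := by simp [rowLens]
    rw [hr]
    rcases lt_or_ge j a.length with h | h
    · rw [if_pos h]
      congr 1
      simp [pvColStep, h]
    · rw [if_neg (not_lt_of_ge h)]
      congr 1
      simp [pvColStep, not_lt_of_ge h]

theorem foldl_merge_length (l : List (List String)) (s : List Int) :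
    (l.foldl (fun s a => pvMerge s (rowLens a)) s).length = l.foldl (fun m a => max m a.length) s.length := by
  induction l generalizing s with
  | nil => simp
  | cons a t ih =>
    simp only [List.foldl_cons]
    rw [ih, pvMerge_length]
    congr 1
    simp [rowLens]

theorem foldl_max_cast (t : List (List String)) (n : Nat) :
    ((t.map fun a => ((a.length : Int))).foldl max (n : Int)) = ((t.foldl (fun m a => max m a.length) n : Nat) : Int) := by
  induction t generalizing n with
  | nil => simp
  | cons a r ih => simp [ih, ← Nat.cast_max]

theorem rowLens_getD (a : List String) (j : Nat) (h : j < a.length) :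
    (rowLens a).getD j 0 = PySem.Str.len (a.getD j "") := by
  rw [rowLens, List.getD_eq_getElem _ _ (by simpa using h), List.getD_eq_getElem _ _ h]
  simp

theorem get_max_lengths_spec_aux (l : List (List String)) :
    get_max_lengths l = get_max_lengths_alt l := by
  rcases eq_or_ne l [] with rfl | hl
  · rfl
  · rw [get_max_lengths_eq_foldl_merge]
    unfold get_max_lengths_alt
    rw [if_neg hl]
    set maxLen := l.foldl (fun m a => max m a.length) 0 with hml
    have hcols : (PySem.List.max? (l.map fun a => ((a.length : Int))) (fun x => x)).getD 0 = (maxLen : Int) := by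
      obtain ⟨a, t, rfl⟩ := List.exists_cons_of_ne_nil hl
      rw [List.map_cons, PySem.List.max?_id_cons, Option.getD_some, foldl_max_cast]
      simp [hml]
    simp only [hcols, PySem.List.pyRange_zero_natCast, List.map_map]
    apply List.ext_getElem
    · simp [foldl_merge_length, hml]
    · intro j hj hj2
      rw [foldl_merge_length] at hj
      simp only [List.length_nil] at hj
      simp only [List.getElem_map, List.getElem_range, Function.comp_apply, Int.toNat_natCast]
      rw [← List.getD_eq_getElem _ 0 (by rw [foldl_merge_length]; simpa using hj), foldl_merge_getD]
      have hfil : l.filter (fun a => decide ((j : Int) < ((a.length : Int))))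
          = l.filter (fun a => decide (j < a.length)) := by
        refine List.filter_congr (fun a _ => ?_)
        simp
      have hL : l.foldl (pvColStep j) (List.getD [] j 0)
          = ((l.filter (fun a => decide (j < a.length))).map
              (fun a => PySem.Str.len (a.getD j ""))).foldl max 0 := by
        simp only [List.getD_nil]
        have hstep : pvColStep j = fun acc a =>
            if j < a.length then (fun acc (a : List String) => max acc (PySem.Str.len (a.getD j ""))) acc a else acc := by
          funext acc a
          unfold pvColStep
          split_ifs with h
          · rw [rowLens_getD a j h]
          · rfl
        rw [hstep, PySem.List.foldl_ite_eq_foldl_filter (p := fun a : List String => j < a.length)]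
        rw [List.foldl_map]
      rw [hL, ← hfil]
      have hj' : j < (l.map List.length).foldl max 0 := by
        rw [List.foldl_map]; exact hj
      have hex : ∃ a ∈ l, j < a.length := by
        rcases PySem.List.foldl_max_mem (l.map List.length) 0 with h0 | hmem
        · rw [h0] at hj'; omega
        · obtain ⟨a, ha, hla⟩ := List.mem_map.mp hmem
          exact ⟨a, ha, by omega⟩
      obtain ⟨a0, ha0, hja0⟩ := hex
      set vals := ((l.filter (fun a => decide ((j:Int) < ((a.length : Int))))).map
              (fun a => PySem.Str.len (a.getD j ""))) with hvals
      have hne : vals ≠ [] := by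
        simp only [hvals, ne_eq, List.map_eq_nil_iff, List.filter_eq_nil_iff, not_forall]
        push Not
        exact ⟨a0, ha0, by simpa using hja0⟩
      obtain ⟨v, t, hvt⟩ := List.exists_cons_of_ne_nil hne
      have hv0 : (0:Int) ≤ v := by
        have hvmem : v ∈ vals := by rw [hvt]; exact List.mem_cons_self
        obtain ⟨a, _, rfl⟩ := List.mem_map.mp (hvals ▸ hvmem)
        rw [PySem.Str.len_eq]
        positivity
      rw [hvt, PySem.List.max?_id_cons, Option.getD_some, List.foldl_cons, max_eq_right hv0]

-- ===== VERDICT (by name: the statement is the Claim_ definition above) =====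
theorem get_max_lengths_spec : Claim_equal_get_max_lengths := by
  intro l _
  exact get_max_lengths_spec_aux l
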